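-- pv_equiv track=rewrite | github.com/adrianp-7/COP4533-Assignment-2 | src/cache_algos.py | lru_evict
-- ===== SOURCE A (Python) =====
-- from typing import List, Tuple
--
-- def lru_evict(k: int, requests: List[int]) -> int:
--     """
--     LRU evicts the item that was least recently used
--     We keep a list where the end of the list is the most recently used
--     """
--     cache = []          # store items; order represents recency (oldest at index 0)
--     misses = 0
--
--     for r in requests:
--         if r in cache:
--             # Cache hit: move this item to the end (most recently used)
--             cache.remove(r)
--             cache.append(r)
--         else:
--             # Cache miss
--             misses += 1
--             if len(cache) < k:
--                 # Space available: just add item as most recently used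
--                 cache.append(r)
--             else:
--                 # Cache full: evict least recently used (front)
--                 cache.pop(0)
--                 cache.append(r)
--
--     return misses
-- ===== SOURCE B (Python) =====
-- def lru_evict(k: int, requests: list) -> int:
--     """Count LRU misses by the stack-distance (reuse-distance) characterisation:
--     no cache is simulated.  Request i is a hit iff the same value occurred before
--     and fewer than k DISTINCT values were requested since its last occurrence
--     (the LRU stack property); the backward scan stops as soon as k distinct
--     values have been seen, since the request is then certainly a miss."""
--     misses = 0
--     for i, r in enumerate(requests):
--         seen = set()
--         j = i - 1
--         while j >= 0 and requests[j] != r and len(seen) < k: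
--             seen.add(requests[j])
--             j -= 1
--         if j < 0 or len(seen) >= k:
--             misses += 1
--     return misses
-- ===== Notes on version B (the rewrite author's own statement) =====
-- stated objective: alternative
-- what changed: B simulates no cache at all: by the LRU stack property a request is a hit iff fewer than k distinct values were requested since its last occurrence, so B decides each request by a backward reuse-distance scan that stops at the previous occurrence or after k distinct values.
import Mathlib
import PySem

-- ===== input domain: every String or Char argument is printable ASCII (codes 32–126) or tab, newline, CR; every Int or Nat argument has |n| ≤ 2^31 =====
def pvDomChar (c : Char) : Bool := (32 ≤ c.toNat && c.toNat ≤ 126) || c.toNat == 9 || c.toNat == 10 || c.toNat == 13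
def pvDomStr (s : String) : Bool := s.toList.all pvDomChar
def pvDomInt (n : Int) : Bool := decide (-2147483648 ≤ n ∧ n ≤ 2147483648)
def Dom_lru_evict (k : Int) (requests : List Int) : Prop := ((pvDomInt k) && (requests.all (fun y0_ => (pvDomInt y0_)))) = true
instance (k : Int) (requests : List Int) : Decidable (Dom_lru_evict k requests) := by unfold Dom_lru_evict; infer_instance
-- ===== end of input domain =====

-- A simulates the LRU recency list; B instead counts misses by the LRU stack property
-- (a request hits iff fewer than k DISTINCT values occurred since its last occurrence) — an
-- alternative algorithm with no cache state; equal return values proved on Pre_.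

-- ===== PORT A =====
-- loop body of A, one request r against state (cache, misses)
def lruStepA (k : Int) (st : List Int × Int) (r : Int) : List Int × Int :=
  if r ∈ st.1 then
    -- cache.remove(r) with r present removes the first occurrence = List.erase; then append
    (st.1.erase r ++ [r], st.2)
  else if (st.1.length : Int) < k then
    (st.1 ++ [r], st.2 + 1)
  else
    -- cache.pop(0); Python raises IndexError on an empty cache (k ≤ 0) — excluded by Pre_
    match PySem.List.pop? st.1 0 with
    | some (_, rest) => (rest ++ [r], st.2 + 1)
    | none => (st.1, st.2 + 1)

def lru_evict (k : Int) (requests : List Int) : Int :=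
  (requests.foldl (lruStepA k) ([], 0)).2

-- ===== PORT B =====
-- the while loop 'j >= 0 and requests[j] != r and len(seen) < k' walking the earlier
-- requests backwards, adding each to the seen-set; Bool result = 'stopped on a previous
-- occurrence of r' (the scan exits early once the seen-set holds k distinct values)
def scanBackB (k : Int) (r : Int) : List Int → PySem.Set Int → PySem.Set Int × Bool
  | [], seen => (seen, false)
  | x :: rest, seen =>
    if x == r then (seen, true)
    else if k ≤ (seen.length : Int) then (seen, false)
    else scanBackB k r rest (PySem.Set.add seen x)

-- body of 'for i, r in enumerate(requests)': state = (i, misses)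
def lruStepB (requests : List Int) (k : Int) (st : Nat × Int) (r : Int) : Nat × Int :=
  let res := scanBackB k r ((requests.take st.1).reverse) PySem.Set.empty
  (st.1 + 1, if !res.2 || k ≤ (res.1.length : Int) then st.2 + 1 else st.2)

def lru_evict_alt (k : Int) (requests : List Int) : Int :=
  (requests.foldl (lruStepB requests k) (0, 0)).2

-- ===== PRECONDITION & SPEC =====
-- Pre_ excludes exactly the inputs where A raises: with k ≤ 0 and at least one request,
-- A's first miss reaches cache.pop(0) on an empty list (IndexError).
def Pre_lru_evict (k : Int) (requests : List Int) : Prop := 0 < k ∨ requests = []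
instance (k : Int) (requests : List Int) : Decidable (Pre_lru_evict k requests) := by unfold Pre_lru_evict; infer_instance
def pvWitness_lru_evict : Int × List Int := (2, [1, 2, 3, 1, 2, 3])

def Spec_lru_evict (k : Int) (requests : List Int) (out : Int) : Prop := out = lru_evict_alt k requests
instance (k : Int) (requests : List Int) (out : Int) : Decidable (Spec_lru_evict k requests out) := by unfold Spec_lru_evict; infer_instance

-- ===== CLAIM (what is proved, stated in full; the proofs are below) =====
def Claim_equal_lru_evict : Prop := ∀ (k : Int) (requests : List Int), Dom_lru_evict k requests → Pre_lru_evict k requests → Spec_lru_evict k requests (lru_evict k requests)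
-- ===== LEMMAS AND PROOFS =====

-- first-occurrence dedup (the distinct values of a list, in first-occurrence order)
def Fdedup : List Int → List Int
  | [] => []
  | x :: xs => x :: (Fdedup xs).filter (fun y => y != x)

-- A's cache after processing prefix p: the (up to k) most recently used distinct values,
-- least recent first = reversed take-k of the first-dedup of the reversed prefix
def Ccache (kn : Nat) (p : List Int) : List Int := ((Fdedup p.reverse).take kn).reverse

theorem mem_Fdedup (x : Int) (l : List Int) : x ∈ Fdedup l ↔ x ∈ l := by
  induction l with
  | nil => simp [Fdedup]
  | cons a l ih =>
    by_cases hxa : x = a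
    · simp [Fdedup, hxa]
    · simp [Fdedup, List.mem_filter, hxa, ih, bne_iff_ne]

theorem nodup_Fdedup (l : List Int) : (Fdedup l).Nodup := by
  induction l with
  | nil => simp [Fdedup]
  | cons a l ih =>
    refine List.nodup_cons.2 ⟨?_, ih.filter _⟩
    intro h
    have := (List.mem_filter.1 h).2
    simp at this

theorem Fdedup_append (a b : List Int) :
    Fdedup (a ++ b) = Fdedup a ++ (Fdedup b).filter (fun y => decide (y ∉ a)) := by
  induction a with
  | nil => simp [Fdedup]
  | cons x a' ih =>
    simp only [List.cons_append, Fdedup, ih, List.filter_append, List.cons_append,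
      List.cons.injEq, true_and, List.filter_filter, List.append_cancel_left_eq]
    apply List.filter_congr
    intro y _
    by_cases hyx : y = x <;> by_cases hya : y ∈ a' <;> simp [hyx, hya, bne_iff_ne]

-- membership in a take across 'A ++ r :: w' with r not in A
theorem mem_take_middle (r : Int) (A w : List Int) (hA : r ∉ A) :
    ∀ kn : Nat, r ∈ (A ++ r :: w).take kn ↔ A.length < kn := by
  induction A with
  | nil =>
    intro kn
    cases kn with
    | zero => simp
    | succ j => simp
  | cons a A' ih =>
    intro kn
    have hA' : r ∉ A' := fun h => hA (List.mem_cons_of_mem _ h)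
    have har : r ≠ a := fun h => hA (h ▸ List.mem_cons_self)
    cases kn with
    | zero => simp
    | succ j =>
      simp only [List.cons_append, List.take_succ_cons, List.mem_cons, List.length_cons]
      constructor
      · rintro (h | h)
        · exact absurd h har
        · have := (ih hA' j).1 h; omega
      · intro h
        exact Or.inr ((ih hA' j).2 (by omega))

-- filter out a present element commutes with take (nodup list)
theorem take_filter_of_mem (r : Int) :
    ∀ (Q : List Int) (j : Nat), Q.Nodup → r ∈ Q.take (j + 1) →
      (Q.take (j + 1)).filter (fun y => y != r) = (Q.filter (fun y => y != r)).take j := by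
  intro Q
  induction Q with
  | nil => intro j _ h; simp at h
  | cons x Q' ih =>
    intro j hnd hr
    have hnd' := List.nodup_cons.1 hnd
    by_cases hxr : x = r
    · have hnotin : r ∉ Q' := hxr ▸ hnd'.1
      have h1 : (Q'.take j).filter (fun y => y != r) = Q'.take j :=
        List.filter_eq_self.2 (fun y hy => by
          simp only [bne_iff_ne, ne_eq]
          exact fun e => hnotin (e ▸ List.mem_of_mem_take hy))
      have h2 : Q'.filter (fun y => y != r) = Q' :=
        List.filter_eq_self.2 (fun y hy => by
          simp only [bne_iff_ne, ne_eq]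
          exact fun e => hnotin (e ▸ hy))
      have hbx : (x != r) = false := by simp [hxr]
      simp [List.take_succ_cons, hbx, h1, h2]
    · have hrQ : r ∈ Q'.take j := by
        rcases List.mem_cons.1 (by simpa [List.take_succ_cons] using hr) with h | h
        · exact absurd h.symm hxr
        · exact h
      cases j with
      | zero => simp at hrQ
      | succ j' =>
        have := ih j' hnd'.2 hrQ
        have hbx : (x != r) = true := by simp [bne_iff_ne, hxr]
        simp only [List.take_succ_cons, List.filter_cons]
        simp only [hbx, if_true, this, List.take_succ_cons]

-- filter out an element absent from the first kn+1 entries leaves the first kn entries alone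
theorem take_filter_of_not_mem (r : Int) :
    ∀ (Q : List Int) (j : Nat), r ∉ Q.take (j + 1) →
      (Q.filter (fun y => y != r)).take j = Q.take j := by
  intro Q
  induction Q with
  | nil => intro j _; simp
  | cons x Q' ih =>
    intro j hr
    simp only [List.take_succ_cons, List.mem_cons, not_or] at hr
    have hbx : (x != r) = true := by
      simp only [bne_iff_ne, ne_eq]
      exact fun e => hr.1 e.symm
    cases j with
    | zero => simp
    | succ j' =>
      have := ih j' hr.2
      simp [hbx, List.take_succ_cons, this]

-- the hit characterisation: r is among the kn most recently used distinct values of prefix p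
-- (with q = p.reverse) iff r occurs in q and the number of distinct values before its first
-- occurrence in q is < kn
theorem hit_iff (r : Int) (q : List Int) (kn : Nat) :
    r ∈ (Fdedup q).take kn ↔
      (r ∈ q ∧ (Fdedup (q.takeWhile (fun x => x != r))).length < kn) := by
  by_cases hrq : r ∈ q
  · -- q = t ++ r :: z with t the r-free prefix
    have hd : q.dropWhile (fun x => x != r) ≠ [] := by
      intro h
      have : q.takeWhile (fun x => x != r) = q := by
        have := List.takeWhile_append_dropWhile (p := fun x => x != r) (l := q)
        rw [h, List.append_nil] at this; exact this
      have := List.mem_takeWhile_imp (l := q) (p := fun x => x != r) (this ▸ hrq)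
      simp at this
    obtain ⟨r₀, z, hz⟩ := List.exists_cons_of_ne_nil hd
    have hr₀ : r₀ = r := by
      have h := List.head?_dropWhile_not (p := fun x => x != r) (l := q)
      rw [hz] at h
      simpa using h
    rw [hr₀] at hz
    set t := q.takeWhile (fun x => x != r) with ht
    have hq : q = t ++ r :: z := by
      rw [ht, ← hz, List.takeWhile_append_dropWhile]
    have hrt : r ∉ t := by
      intro h
      have := List.mem_takeWhile_imp (l := q) (p := fun x => x != r) h
      simp at this
    have hdecomp : ∃ w : List Int, Fdedup q = Fdedup t ++ r :: w := by
      rw [hq, Fdedup_append]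
      refine ⟨((Fdedup z).filter (fun y => y != r)).filter (fun y => decide (y ∉ t)), ?_⟩
      simp only [Fdedup, List.filter_cons]
      rw [if_pos (show decide (r ∉ t) = true by simp [hrt])]
    obtain ⟨w, hw⟩ := hdecomp
    have hrFt : r ∉ Fdedup t := fun h => hrt ((mem_Fdedup r t).1 h)
    rw [hw, mem_take_middle r (Fdedup t) w hrFt kn]
    simp [hrq]
  · -- r never occurs: both sides false
    have h1 : r ∉ (Fdedup q).take kn := fun h =>
      hrq ((mem_Fdedup r q).1 (List.mem_of_mem_take h))
    simp [h1, hrq]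

-- adding to a set never shrinks it
theorem length_le_foldl_add (t : List Int) :
    ∀ s : PySem.Set Int, s.length ≤ (t.foldl PySem.Set.add s).length := by
  induction t with
  | nil => intro s; exact le_refl _
  | cons x t' ih =>
    intro s
    refine le_trans ?_ (ih (PySem.Set.add s x))
    rw [PySem.Set.add_eq_ite]
    split
    · exact le_refl _
    · simp

-- the miss decision of the (early-stopping) backward scan equals the one computed from the
-- full set of distinct values strictly between the request and its previous occurrence
theorem scanBackB_miss (k : Int) (r : Int) (q : List Int) : ∀ s : PySem.Set Int,
    (!(scanBackB k r q s).2 || decide (k ≤ (((scanBackB k r q s).1).length : Int)))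
      = (!(decide (r ∈ q))
          || decide (k ≤ ((((q.takeWhile (fun x => x != r)).foldl PySem.Set.add s)).length : Int))) := by
  induction q with
  | nil => intro s; simp [scanBackB]
  | cons x q' ih =>
    intro s
    by_cases hxr : x = r
    · have hx : (x == r) = true := by simp [hxr]
      simp [scanBackB, hxr]

    · have hx : (x == r) = false := by simp [hxr]
      have hbx : (x != r) = true := by simp [bne_iff_ne, hxr]
      have hmem : decide (r ∈ x :: q') = decide (r ∈ q') := by
        rw [decide_eq_decide, List.mem_cons]
        exact or_iff_right (fun e => hxr e.symm)
      have htw : (x :: q').takeWhile (fun y => y != r)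
          = x :: q'.takeWhile (fun y => y != r) := by
        rw [List.takeWhile_cons, hbx]; simp
      by_cases hks : k ≤ (s.length : Int)
      · -- early stop: the full seen-set is at least as large, so both sides say miss
        have hfull : k ≤ ((((x :: q').takeWhile (fun y => y != r)).foldl PySem.Set.add s).length : Int) := by
          refine le_trans hks ?_
          exact_mod_cast length_le_foldl_add _ s
        simp [scanBackB, hx, hks, hfull]
      · rw [show scanBackB k r (x :: q') s = scanBackB k r q' (PySem.Set.add s x) by
            simp [scanBackB, hx, hks]]
        rw [ih (PySem.Set.add s x), hmem, htw, List.foldl_cons]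

-- the seen-set has as many elements as the first-dedup of the scanned segment
theorem length_ofList_eq_Fdedup (t : List Int) :
    (PySem.Set.ofList t).length = (Fdedup t).length := by
  refine List.Perm.length_eq ((List.perm_ext_iff_of_nodup (PySem.Set.nodup_ofList _) (nodup_Fdedup t)).2 ?_)
  intro a
  rw [PySem.Set.mem_ofList, mem_Fdedup]

-- A's step: the miss counter
theorem stepA_snd (k : Int) (C : List Int) (m r : Int) :
    (lruStepA k (C, m) r).2 = if r ∈ C then m else m + 1 := by
  unfold lruStepA
  by_cases h : r ∈ C
  · simp [h]
  · simp only [h, if_false]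
    split
    · simp
    · cases hp : PySem.List.pop? C 0 with
      | none => simp
      | some pr => cases pr; simp

-- A's step: the cache update, against the Ccache characterisation
theorem stepA_fst (k : Int) (hk : 0 < k) (p : List Int) (m r : Int) :
    (lruStepA k (Ccache k.toNat p, m) r).1 = Ccache k.toNat (p ++ [r]) := by
  obtain ⟨j, hj⟩ : ∃ j : Nat, k.toNat = j + 1 := ⟨k.toNat - 1, by omega⟩
  have hQnd : (Fdedup p.reverse).Nodup := nodup_Fdedup _
  have hCnd : (Ccache k.toNat p).Nodup :=
    List.nodup_reverse.2 (hQnd.sublist (List.take_sublist ..))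
  have hnew : Fdedup (p ++ [r]).reverse
      = r :: (Fdedup p.reverse).filter (fun y => y != r) := by
    simp [Fdedup]
  by_cases hrC : r ∈ Ccache k.toNat p
  · -- hit: move to end
    have hrT : r ∈ (Fdedup p.reverse).take k.toNat := by
      simpa [Ccache, List.mem_reverse] using hrC
    unfold lruStepA
    simp only [hrC, if_true]
    rw [hCnd.erase_eq_filter r]
    unfold Ccache
    rw [hnew, hj, List.take_succ_cons, List.reverse_cons, List.filter_reverse,
      take_filter_of_mem r (Fdedup p.reverse) j hQnd (hj ▸ hrT)]
  · have hrT : r ∉ (Fdedup p.reverse).take k.toNat := by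
      simpa [Ccache, List.mem_reverse] using hrC
    have hlenC : (Ccache k.toNat p).length = min k.toNat (Fdedup p.reverse).length := by
      simp [Ccache]
    by_cases hlt : ((Ccache k.toNat p).length : Int) < k
    · -- miss with space: whole dedup fits
      have hQlt : (Fdedup p.reverse).length < k.toNat := by omega
      have htake : (Fdedup p.reverse).take k.toNat = Fdedup p.reverse :=
        List.take_of_length_le (by omega)
      have hrQ : r ∉ Fdedup p.reverse := fun h => hrT (by rw [htake]; exact h)
      have hfilter : (Fdedup p.reverse).filter (fun y => y != r) = Fdedup p.reverse :=
        List.filter_eq_self.2 (fun y hy => by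
          simp only [bne_iff_ne, ne_eq]
          exact fun e => hrQ (e ▸ hy))
      unfold lruStepA
      simp only [hrC, if_false, hlt, if_true]
      unfold Ccache
      rw [hnew, hj, List.take_succ_cons, List.reverse_cons, hfilter,
        List.take_of_length_le (by omega), List.take_of_length_le (by omega)]
    · -- miss, cache full: evict front
      have hQge : k.toNat ≤ (Fdedup p.reverse).length := by omega
      have hjlt : j < (Fdedup p.reverse).length := by omega
      have htake : (Fdedup p.reverse).take k.toNat
          = (Fdedup p.reverse).take j ++ [(Fdedup p.reverse)[j]] := by
        rw [hj, List.take_add_one, List.getElem?_eq_getElem hjlt]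
        simp
      have hCform : Ccache k.toNat p
          = (Fdedup p.reverse)[j] :: ((Fdedup p.reverse).take j).reverse := by
        unfold Ccache
        rw [htake, List.reverse_append]
        simp
      unfold lruStepA
      simp only [hrC, if_false, hlt]
      rw [hCform]
      rw [PySem.List.pop?_zero_cons]
      unfold Ccache
      rw [hnew, hj, List.take_succ_cons, List.reverse_cons,
        take_filter_of_not_mem r (Fdedup p.reverse) j (hj ▸ hrT)]

-- the joint loop invariant: B's running miss count equals A's
theorem loopEq (k : Int) (hk : 0 < k) (requests : List Int) :
    ∀ (rs p : List Int) (m : Int), requests = p ++ rs →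
      (rs.foldl (lruStepB requests k) (p.length, m)).2
        = (rs.foldl (lruStepA k) (Ccache k.toNat p, m)).2 := by
  intro rs
  induction rs with
  | nil => intro p m _; rfl
  | cons r rs' ih =>
    intro p m hreq
    have htake : requests.take p.length = p := by
      rw [hreq, List.take_left]
    have hscan : (!(scanBackB k r ((requests.take p.length).reverse) PySem.Set.empty).2
          || decide (k ≤ (((scanBackB k r ((requests.take p.length).reverse) PySem.Set.empty).1).length : Int)))
        = (!(decide (r ∈ p.reverse))
            || decide (k ≤ ((PySem.Set.ofList ((p.reverse).takeWhile (fun x => x != r))).length : Int))) := by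
      rw [htake, scanBackB_miss k r p.reverse PySem.Set.empty, PySem.Set.ofList_eq_foldl]
      rfl
    have hkn : 0 < k.toNat := by omega
    have hmem : r ∈ Ccache k.toNat p ↔
        (r ∈ p.reverse ∧ (Fdedup ((p.reverse).takeWhile (fun x => x != r))).length < k.toNat) := by
      unfold Ccache
      rw [List.mem_reverse]
      exact hit_iff r p.reverse k.toNat
    have hlen := length_ofList_eq_Fdedup ((p.reverse).takeWhile (fun x => x != r))
    have hcond : (!(decide (r ∈ p.reverse))
          || decide (k ≤ ((PySem.Set.ofList ((p.reverse).takeWhile (fun x => x != r))).length : Int)))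
        = !(decide (r ∈ Ccache k.toNat p)) := by
      by_cases h1 : r ∈ p.reverse <;>
        by_cases h2 : (Fdedup ((p.reverse).takeWhile (fun x => x != r))).length < k.toNat
      · have hin : r ∈ Ccache k.toNat p := hmem.2 ⟨h1, h2⟩
        simp [h1, hin, hlen]; omega
      · have hout : r ∉ Ccache k.toNat p := fun h => h2 (hmem.1 h).2
        simp [h1, hout, hlen]; omega
      · have hout : r ∉ Ccache k.toNat p := fun h => h1 (hmem.1 h).1
        simp [h1, hout]
      · have hout : r ∉ Ccache k.toNat p := fun h => h1 (hmem.1 h).1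
        simp [h1, hout]
    have hstepB : lruStepB requests k (p.length, m) r
        = (p.length + 1, if r ∈ Ccache k.toNat p then m else m + 1) := by
      have hred : lruStepB requests k (p.length, m) r
          = (p.length + 1,
              if (!(scanBackB k r ((requests.take p.length).reverse) PySem.Set.empty).2
                  || decide (k ≤ (((scanBackB k r ((requests.take p.length).reverse) PySem.Set.empty).1).length : Int))) = true
              then m + 1 else m) := rfl
      rw [hred, hscan.trans hcond]
      by_cases h : r ∈ Ccache k.toNat p <;> simp [h]
    rw [List.foldl_cons, List.foldl_cons, hstepB]
    have hA : lruStepA k (Ccache k.toNat p, m) r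
        = (Ccache k.toNat (p ++ [r]), if r ∈ Ccache k.toNat p then m else m + 1) := by
      rw [show lruStepA k (Ccache k.toNat p, m) r
          = ((lruStepA k (Ccache k.toNat p, m) r).1, (lruStepA k (Ccache k.toNat p, m) r).2) from rfl,
        stepA_fst k hk p m r, stepA_snd]
    rw [hA]
    have hlen : p.length + 1 = (p ++ [r]).length := by simp
    rw [hlen]
    exact ih (p ++ [r]) _ (by rw [hreq]; simp)

-- ===== VERDICT (by name: the statement is the Claim_ definition above) =====
theorem lru_evict_spec : Claim_equal_lru_evict := by
  intro k requests _ hpre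
  unfold Spec_lru_evict lru_evict lru_evict_alt
  rcases hpre with hk | hnil
  · have h := (loopEq k hk requests requests [] 0 rfl).symm
    simpa [Ccache, Fdedup] using h
  · subst hnil; rfl
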